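-- pv_equiv track=rewrite | github.com/its-serah/kg-healing-docred | comprehensive_evaluation.py | compute_ground_truth_pairs
-- ===== SOURCE A (Python) =====
-- from typing import Dict, List, Tuple, Any, Set
-- from collections import defaultdict
--
-- def compute_ground_truth_pairs(global_entity_map: Dict) -> Set[Tuple[Tuple[int, int], Tuple[int, int]]]:
--     """Compute ground truth duplicate pairs.
--
--     Args:
--         global_entity_map: Mapping from (doc_idx, ent_idx) to canonical entity
--
--     Returns:
--         Set of ground truth duplicate pairs
--     """
--     # Group entities by canonical ID
--     canonical_groups = defaultdict(list)
--
--     for (doc_idx, ent_idx), entity_info in global_entity_map.items():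
--         canonical_id = entity_info['entity_id']
--         canonical_groups[canonical_id].append((doc_idx, ent_idx))
--
--     # Generate all pairs within each group
--     ground_truth_pairs = set()
--
--     for canonical_id, entity_positions in canonical_groups.items():
--         if len(entity_positions) > 1:
--             # All pairs within this group are duplicates
--             for i in range(len(entity_positions)):
--                 for j in range(i + 1, len(entity_positions)):
--                     pos1, pos2 = entity_positions[i], entity_positions[j]
--                     # Ensure consistent ordering
--                     pair = tuple(sorted([pos1, pos2]))
--                     ground_truth_pairs.add(pair)
--
--     return ground_truth_pairs
-- ===== SOURCE B (Python) =====
-- def compute_ground_truth_pairs(global_entity_map):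
--     """Compute ground truth duplicate pairs (recursive partition by the first
--     entry's canonical id instead of building a defaultdict index)."""
--     pairs = []
--     items = [(pos, info['entity_id']) for pos, info in global_entity_map.items()]
--     while items:
--         (head, cid), rest = items[0], items[1:]
--         group = [head] + [p for p, c in rest if c == cid]
--         for i, p in enumerate(group):
--             for q in group[i + 1:]:
--                 pairs.append((p, q) if p <= q else (q, p))
--         items = [(p, c) for p, c in rest if c != cid]
--     return set(pairs)
-- ===== Notes on version B (the rewrite author's own statement) =====
-- stated objective: alternative
-- what changed: B drops the defaultdict grouping and the per-group nested index loops: it recursively partitions the entry list on the first entry's canonical id, emitting that group's pairs and recursing on the remaining entries.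
import Mathlib
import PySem

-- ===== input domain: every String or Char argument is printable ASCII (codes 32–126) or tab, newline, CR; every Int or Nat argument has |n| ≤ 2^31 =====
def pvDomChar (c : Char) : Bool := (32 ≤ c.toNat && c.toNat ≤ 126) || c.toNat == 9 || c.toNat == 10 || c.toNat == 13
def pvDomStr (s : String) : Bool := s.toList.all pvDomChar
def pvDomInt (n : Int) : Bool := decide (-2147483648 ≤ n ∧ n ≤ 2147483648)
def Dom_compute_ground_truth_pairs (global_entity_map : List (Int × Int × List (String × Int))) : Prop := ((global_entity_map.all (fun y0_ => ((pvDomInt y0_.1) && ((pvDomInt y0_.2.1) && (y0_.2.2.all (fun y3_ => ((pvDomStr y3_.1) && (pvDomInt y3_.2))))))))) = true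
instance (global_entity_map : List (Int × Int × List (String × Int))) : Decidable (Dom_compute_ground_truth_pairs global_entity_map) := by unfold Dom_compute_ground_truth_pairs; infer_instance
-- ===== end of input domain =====

-- B replaces A's defaultdict grouping + per-group nested index loops by a recursive
-- partition on the first entry's canonical id (simpler/alternative; not claimed faster).
-- Return value only; neither version mutates its argument.

-- ===== PORT A =====

-- entity_info['entity_id']: first-match lookup; a missing key (Python KeyError) is excluded by Pre_
def pvCidA (entity_info : List (String × Int)) : Int :=
  (PySem.Dict.mk entity_info).getD "entity_id" 0

-- tuple(sorted([pos1, pos2])) on a two-element list of int pairs: Python's lexicographic tuple order, exact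
def pvSortedPairA (pos1 pos2 : Int × Int) : (Int × Int) × (Int × Int) :=
  if pos1.1 < pos2.1 ∨ (pos1.1 = pos2.1 ∧ pos1.2 ≤ pos2.2) then (pos1, pos2) else (pos2, pos1)

def compute_ground_truth_pairs (global_entity_map : List (Int × Int × List (String × Int))) : List ((Int × Int) × (Int × Int)) :=
  -- for (doc_idx, ent_idx), entity_info in global_entity_map.items(): canonical_groups[canonical_id].append(...)
  let canonical_groups : PySem.Dict Int (List (Int × Int)) :=
    global_entity_map.foldl
      (fun d e => d.modify (pvCidA e.2.2) [] (fun l => l ++ [(e.1, e.2.1)]))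
      PySem.Dict.empty
  -- for canonical_id, entity_positions in canonical_groups.items(): nested i/j loops adding sorted pairs
  canonical_groups.items.foldl
    (fun s g =>
      if 1 < (g.2.length : Int) then
        (PySem.List.pyRange 0 (PySem.List.len g.2)).foldl
          (fun s i =>
            (PySem.List.pyRange (i + 1) (PySem.List.len g.2)).foldl
              (fun s j =>
                PySem.Set.add s
                  (pvSortedPairA (PySem.List.pyGetD g.2 i (0, 0)) (PySem.List.pyGetD g.2 j (0, 0))))
              s)
          s
      else s)
    ([] : PySem.Set ((Int × Int) × (Int × Int)))

-- ===== PORT B =====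

-- info['entity_id'] in B's items comprehension; missing key (KeyError) excluded by Pre_
def pvCidB (info : List (String × Int)) : Int :=
  (PySem.Dict.mk info).getD "entity_id" 0

-- (p, q) if p <= q else (q, p) — Python's lexicographic tuple order, exact
def pvOrderedB (p q : Int × Int) : (Int × Int) × (Int × Int) :=
  if p.1 < q.1 ∨ (p.1 = q.1 ∧ p.2 ≤ q.2) then (p, q) else (q, p)

-- for i, p in enumerate(group): for q in group[i+1:]: pairs.append(...)
def pvGroupPairsB : List (Int × Int) → List ((Int × Int) × (Int × Int))
  | [] => []
  | p :: rest => rest.map (fun q => pvOrderedB p q) ++ pvGroupPairsB rest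

-- the while loop: split off the first entry's group, recurse on the rest
def pvPairsB : List ((Int × Int) × Int) → List ((Int × Int) × (Int × Int))
  | [] => []
  | (head, cid) :: rest =>
      pvGroupPairsB (head :: (rest.filter (fun x => x.2 == cid)).map (fun x => x.1))
        ++ pvPairsB (rest.filter (fun x => x.2 != cid))
  termination_by l => l.length
  decreasing_by simp; exact le_trans (List.length_filter_le _ _) (by simp)

def compute_ground_truth_pairs_alt (global_entity_map : List (Int × Int × List (String × Int))) : List ((Int × Int) × (Int × Int)) :=
  PySem.Set.ofList (pvPairsB (global_entity_map.map (fun e => ((e.1, e.2.1), pvCidB e.2.2))))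

-- ===== PRECONDITION & SPEC =====

-- Pre_ excludes exactly the inputs where some entity_info lacks the key "entity_id":
-- there Python A raises KeyError (and Python B raises too).
def Pre_compute_ground_truth_pairs (global_entity_map : List (Int × Int × List (String × Int))) : Prop :=
  ∀ e ∈ global_entity_map, "entity_id" ∈ e.2.2.map Prod.fst

instance (global_entity_map : List (Int × Int × List (String × Int))) : Decidable (Pre_compute_ground_truth_pairs global_entity_map) := by
  unfold Pre_compute_ground_truth_pairs; infer_instance

def pvWitness_compute_ground_truth_pairs : (List (Int × Int × List (String × Int))) :=
  [(0, 0, [("entity_id", 1)]), (0, 1, [("entity_id", 1)])]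

def Spec_compute_ground_truth_pairs (global_entity_map : List (Int × Int × List (String × Int))) (out : List ((Int × Int) × (Int × Int))) : Prop := out = compute_ground_truth_pairs_alt global_entity_map
instance (global_entity_map : List (Int × Int × List (String × Int))) (out : List ((Int × Int) × (Int × Int))) : Decidable (Spec_compute_ground_truth_pairs global_entity_map out) := by unfold Spec_compute_ground_truth_pairs; infer_instance

-- ===== CLAIM (what is proved, stated in full; the proofs are below) =====
def Claim_equal_compute_ground_truth_pairs : Prop := ∀ (global_entity_map : List (Int × Int × List (String × Int))), Dom_compute_ground_truth_pairs global_entity_map → Pre_compute_ground_truth_pairs global_entity_map → Spec_compute_ground_truth_pairs global_entity_map (compute_ground_truth_pairs global_entity_map)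

-- ===== LEMMAS AND PROOFS =====

-- the two pair-ordering helpers agree
theorem pvSortedPairA_eq (p q : Int × Int) : pvSortedPairA p q = pvOrderedB p q := rfl

-- the common "flatten over first-occurrence-deduplicated canonical ids" list
def pvSpecList (m : List (Int × Int × List (String × Int))) : List ((Int × Int) × (Int × Int)) :=
  (PySem.Set.ofList (m.map (fun e => pvCidA e.2.2))).flatMap
    (fun c => pvGroupPairsB ((m.filter (fun e => pvCidA e.2.2 == c)).map (fun e => (e.1, e.2.1))))

-- adding a present element is a no-op
theorem pvAdd_of_mem {α : Type} [BEq α] [LawfulBEq α] (s : PySem.Set α) (x : α) (h : x ∈ s) :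
    PySem.Set.add s x = s := by
  simp [PySem.Set.add, PySem.Set.contains, h]

-- folding add over a list starting from (a :: s) keeps a in front and ignores later copies of a
theorem pvFoldl_add_cons {α : Type} [BEq α] [LawfulBEq α] (l : List α) (a : α) (s : List α) :
    l.foldl PySem.Set.add (a :: s) = a :: (l.filter (fun y => y != a)).foldl PySem.Set.add s := by
  induction l generalizing s with
  | nil => simp
  | cons y l ih =>
    by_cases h : y = a
    · subst h
      rw [List.foldl_cons, pvAdd_of_mem _ _ (by simp : y ∈ y :: s)]
      simpa using ih s
    · have h2 : PySem.Set.add (a :: s) y = a :: PySem.Set.add s y := by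
        have hb : (y == a) = false := by simp [h]
        have ha : ((a :: s).contains y) = s.contains y := by
          simp only [List.contains_cons, hb, Bool.false_or]
        simp only [PySem.Set.add, PySem.Set.contains, ha]
        split_ifs <;> simp
      simp [h, h2, ih]

-- Set.ofList of a cons
theorem pvOfList_cons {α : Type} [BEq α] [LawfulBEq α] (x : α) (l : List α) :
    PySem.Set.ofList (x :: l) = x :: PySem.Set.ofList (l.filter (fun y => y != x)) := by
  rw [PySem.Set.ofList_eq_foldl, PySem.Set.ofList_eq_foldl]
  have : PySem.Set.add [] x = [x] := by simp [PySem.Set.add, PySem.Set.contains]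
  simp only [List.foldl_cons, this]
  exact pvFoldl_add_cons l x []

theorem pvFoldl_update {α β : Type} [BEq β] (L : List α) (F : α → List β) (s : PySem.Set β) :
    L.foldl (fun s c => PySem.Set.update s (F c)) s = PySem.Set.update s (L.flatMap F) := by
  induction L generalizing s with
  | nil => simp [PySem.Set.update]
  | cons c L ih =>
    simp only [List.foldl_cons, List.flatMap_cons, PySem.Set.update] at *
    rw [ih, List.foldl_append]

-- B's recursion computes pvSpecList
theorem pvPairsB_eq_spec (m : List (Int × Int × List (String × Int))) :
    pvPairsB (m.map (fun e => ((e.1, e.2.1), pvCidB e.2.2))) = pvSpecList m := by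
  generalize hn : m.length = n
  induction n using Nat.strong_induction_on generalizing m with
  | _ n ih =>
    cases m with
    | nil => simp [pvPairsB, pvSpecList, PySem.Set.ofList]
    | cons e rest =>
      have hcid : pvCidB = pvCidA := rfl
      simp only [List.map_cons]
      rw [pvPairsB]
      have hf1 : (List.filter (fun x => x.2 == pvCidB e.2.2)
            (rest.map (fun e => ((e.1, e.2.1), pvCidB e.2.2))))
          = (rest.filter (fun e' => pvCidA e'.2.2 == pvCidA e.2.2)).map
              (fun e => ((e.1, e.2.1), pvCidB e.2.2)) := by
        rw [List.filter_map]; rw [hcid]; rfl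
      have hf2 : (List.filter (fun x => x.2 != pvCidB e.2.2)
            (rest.map (fun e => ((e.1, e.2.1), pvCidB e.2.2))))
          = (rest.filter (fun e' => pvCidA e'.2.2 != pvCidA e.2.2)).map
              (fun e => ((e.1, e.2.1), pvCidB e.2.2)) := by
        rw [List.filter_map]; rw [hcid]; rfl
      rw [hf1, hf2, List.map_map]
      rw [ih (rest.filter (fun e' => pvCidA e'.2.2 != pvCidA e.2.2)).length
            (by subst hn; simp; exact List.length_filter_le _ _) _ rfl]
      -- now the right-hand side
      simp only [pvSpecList, List.map_cons]
      rw [pvOfList_cons, List.filter_map, List.flatMap_cons]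
      have hh : List.filter (fun e' => pvCidA e'.2.2 == pvCidA e.2.2) (e :: rest)
          = e :: rest.filter (fun e' => pvCidA e'.2.2 == pvCidA e.2.2) := by
        rw [List.filter_cons]; simp
      rw [hh]
      congr 1
      apply List.flatMap_congr
      intro c hc
      rw [PySem.Set.mem_ofList] at hc
      obtain ⟨e', he', hce⟩ := List.mem_map.mp hc
      have hne : c ≠ pvCidA e.2.2 := by
        have := (List.mem_filter.mp he').2
        subst hce
        simpa using this
      have hhead : List.filter (fun e' => pvCidA e'.2.2 == c) (e :: rest)
          = rest.filter (fun e' => pvCidA e'.2.2 == c) := by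
        rw [List.filter_cons]
        simp [Ne.symm hne]
      rw [hhead, List.filter_filter]
      congr 2
      apply List.filter_congr
      intro a _
      by_cases hac : pvCidA a.2.2 = c
      · simp only [hac]
        simp [hne]
      · simp [hac]

-- A's nested index loops add exactly pvGroupPairsB of the group
theorem pvInner_eq (ps : List (Int × Int)) (s : PySem.Set ((Int × Int) × (Int × Int))) :
    (PySem.List.pyRange 0 (PySem.List.len ps)).foldl
      (fun s i =>
        (PySem.List.pyRange (i + 1) (PySem.List.len ps)).foldl
          (fun s j =>
            PySem.Set.add s
              (pvSortedPairA (PySem.List.pyGetD ps i (0, 0)) (PySem.List.pyGetD ps j (0, 0))))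
          s)
      s
    = PySem.Set.update s (pvGroupPairsB ps) := by
  simp only [pvSortedPairA_eq]
  induction ps generalizing s with
  | nil =>
    rw [PySem.List.pyRange_one_eq_nil (by simp [PySem.List.len])]
    simp [pvGroupPairsB, PySem.Set.update]
  | cons x xs ih =>
    have hlen : PySem.List.len (x :: xs) = (xs.length : Int) + 1 := by
      simp [PySem.List.len]
    rw [PySem.List.pyRange_one_cons (by rw [hlen]; omega)]
    rw [List.foldl_cons]
    -- head iteration: i = 0
    rw [show (0 : Int) + 1 = 1 from rfl]
    simp only [PySem.List.pyGetD_zero_cons]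
    rw [PySem.List.foldl_pyRange_pyGetD (x :: xs) (0,0)
          (fun acc y => PySem.Set.add acc (pvOrderedB x y)) s (by omega : (0:Int) ≤ 1)]
    simp only [Int.toNat_one, List.drop_succ_cons, List.drop_zero]
    -- remaining iterations: shift the range by one
    have hshift :
        (PySem.List.pyRange 1 (PySem.List.len (x :: xs))).foldl
          (fun s i =>
            (PySem.List.pyRange (i + 1) (PySem.List.len (x :: xs))).foldl
              (fun s j =>
                PySem.Set.add s
                  (pvOrderedB (PySem.List.pyGetD (x :: xs) i (0, 0)) (PySem.List.pyGetD (x :: xs) j (0, 0))))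
              s)
          (List.foldl (fun s y => PySem.Set.add s (pvOrderedB x y)) s xs)
        = (PySem.List.pyRange 0 (PySem.List.len xs)).foldl
          (fun s i =>
            (PySem.List.pyRange (i + 1) (PySem.List.len xs)).foldl
              (fun s j =>
                PySem.Set.add s
                  (pvOrderedB (PySem.List.pyGetD xs i (0, 0)) (PySem.List.pyGetD xs j (0, 0))))
              s)
          (List.foldl (fun s y => PySem.Set.add s (pvOrderedB x y)) s xs) := by
      rw [PySem.List.pyRange_one 1 (PySem.List.len (x :: xs)),
          PySem.List.pyRange_one 0 (PySem.List.len xs)]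
      have h1 : (PySem.List.len (x :: xs) - 1).toNat = xs.length := by
        simp [PySem.List.len]
      have h2 : (PySem.List.len xs - 0).toNat = xs.length := by
        simp [PySem.List.len]
      rw [h1, h2, List.foldl_map, List.foldl_map]
      apply List.foldl_ext
      intro s k hk
      have hc1 : (1 : Int) + (k : Int) = ((k + 1 : Nat) : Int) := by omega
      have hc0 : (0 : Int) + (k : Int) = ((k : Nat) : Int) := by omega
      rw [hc1, hc0]
      rw [PySem.List.foldl_pyRange_pyGetD (x :: xs) (0,0)
            (fun acc y => PySem.Set.add acc (pvOrderedB (PySem.List.pyGetD (x :: xs) ((k + 1 : Nat) : Int) (0, 0)) y))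
            _ (by omega : (0:Int) ≤ ((k+1 : Nat) : Int) + 1)]
      rw [PySem.List.foldl_pyRange_pyGetD xs (0,0)
            (fun acc y => PySem.Set.add acc (pvOrderedB (PySem.List.pyGetD xs ((k : Nat) : Int) (0, 0)) y))
            _ (by omega : (0:Int) ≤ ((k : Nat) : Int) + 1)]
      have hd1 : (((k + 1 : Nat) : Int) + 1).toNat = k + 2 := by omega
      have hd2 : (((k : Nat) : Int) + 1).toNat = k + 1 := by omega
      rw [hd1, hd2, PySem.List.pyGetD_natCast, PySem.List.pyGetD_natCast]
      simp
    rw [hshift, ih]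
    simp only [pvGroupPairsB, PySem.Set.update, List.foldl_append, List.foldl_map]

-- groups of length ≤ 1 contribute no pairs
theorem pvGroupPairsB_short (v : List (Int × Int)) (h : v.length ≤ 1) : pvGroupPairsB v = [] := by
  match v, h with
  | [], _ => rfl
  | [x], _ => rfl

-- a dict with distinct keys is its key list paired with its lookups
theorem pvItems_eq {κ ν : Type} [BEq κ] [LawfulBEq κ] (d : PySem.Dict κ ν) (dflt : ν)
    (h : d.keys.Nodup) : d.items = d.keys.map (fun c => (c, d.getD c dflt)) := by
  obtain ⟨l⟩ := d
  induction l with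
  | nil => rfl
  | cons p rest ihl =>
    obtain ⟨k, v⟩ := p
    rw [PySem.Dict.keys_mk] at h ⊢
    simp only [List.map_cons, List.nodup_cons] at h ⊢
    refine List.cons_eq_cons.mpr ⟨?_, ?_⟩
    · simp [PySem.Dict.getD, PySem.Dict.get?_mk_cons]
    · have hrest := ihl h.2
      rw [PySem.Dict.keys_mk] at hrest
      conv_lhs => rw [show rest = ({ items := rest } : PySem.Dict κ ν).items from rfl, hrest]
      apply List.map_congr_left
      intro c hcmem
      have hkc : (k == c) = false := by
        have : k ≠ c := fun he => h.1 (he ▸ hcmem)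
        simp [this]
      simp [PySem.Dict.getD, PySem.Dict.get?_mk_cons, hkc]

-- A computes Set.ofList of pvSpecList
theorem pvA_eq_spec (m : List (Int × Int × List (String × Int))) :
    compute_ground_truth_pairs m = PySem.Set.ofList (pvSpecList m) := by
  rw [compute_ground_truth_pairs]
  have hkeys : (m.foldl
      (fun d e => d.modify (pvCidA e.2.2) [] (fun l => l ++ [(e.1, e.2.1)]))
      PySem.Dict.empty).keys = PySem.Set.ofList (m.map (fun e => pvCidA e.2.2)) := by
    have h1 := PySem.Dict.keys_foldl_modify_key m (fun e => pvCidA e.2.2) []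
      (fun _ e => fun l => l ++ [(e.1, e.2.1)]) PySem.Dict.empty
    rw [PySem.Dict.keys_empty, PySem.Set.update_nil_left] at h1
    exact h1
  have hnodup : (m.foldl
      (fun d e => d.modify (pvCidA e.2.2) [] (fun l => l ++ [(e.1, e.2.1)]))
      PySem.Dict.empty).keys.Nodup := by
    exact PySem.Dict.nodup_keys_foldl_modify_key m (fun e => pvCidA e.2.2) []
      (fun _ e => fun l => l ++ [(e.1, e.2.1)]) PySem.Dict.empty
      (by rw [PySem.Dict.keys_empty]; exact List.nodup_nil)
  have hgetD : ∀ c : Int, (m.foldl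
      (fun d e => d.modify (pvCidA e.2.2) [] (fun l => l ++ [(e.1, e.2.1)]))
      PySem.Dict.empty).getD c []
      = (m.filter (fun e => pvCidA e.2.2 == c)).map (fun e => (e.1, e.2.1)) := by
    intro c
    have hfold : (m.foldl
        (fun d e => d.modify (pvCidA e.2.2) [] (fun l => l ++ [(e.1, e.2.1)]))
        PySem.Dict.empty)
        = ((m.map (fun e => (pvCidA e.2.2, (e.1, e.2.1)))).foldl
            (fun d p => d.modify p.1 [] (fun l => l ++ [p.2])) PySem.Dict.empty) := by
      rw [List.foldl_map]
    rw [hfold, PySem.Dict.getD_foldl_modify_append, PySem.Dict.getD_empty,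
        List.nil_append, List.filter_map, List.map_map]
    rfl
  rw [pvItems_eq _ ([] : List (Int × Int)) hnodup, List.foldl_map]
  rw [List.foldl_ext _ (fun s c => PySem.Set.update s
        (pvGroupPairsB ((m.filter (fun e => pvCidA e.2.2 == c)).map (fun e => (e.1, e.2.1))))) _
    (by
      intro s c _
      simp only
      rw [hgetD c]
      set v := (m.filter (fun e => pvCidA e.2.2 == c)).map (fun e => (e.1, e.2.1)) with hv
      by_cases h1 : 1 < ((v.length : Int))
      · rw [if_pos h1]
        exact pvInner_eq v s
      · rw [if_neg h1]
        rw [pvGroupPairsB_short v (by omega), PySem.Set.update]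
        rfl)]
  rw [pvFoldl_update, PySem.Set.update_nil_left, hkeys, pvSpecList]

-- ===== VERDICT (by name: the statement is the Claim_ definition above) =====
theorem compute_ground_truth_pairs_spec : Claim_equal_compute_ground_truth_pairs := by
  intro m _ _
  show compute_ground_truth_pairs m = compute_ground_truth_pairs_alt m
  rw [pvA_eq_spec, compute_ground_truth_pairs_alt, pvPairsB_eq_spec]
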